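-- pv_equiv track=rewrite | github.com/jnheo1216/TIL | algorithm/3499_퍼펙트셔플/s1.py | shupple
-- ===== SOURCE A (Python) =====
-- def shupple(n, deck):
--     mid = n // 2
--     if n % 2:
--         mid += 1
--
--     front_deck = deck[:mid]
--     back_deck = deck[mid:]
--
--     result = []
--     for i in range(n):
--         if i % 2:
--             result.append(back_deck.pop(0))
--         else:
--             result.append(front_deck.pop(0))
--
--     return result
-- ===== SOURCE B (Python) =====
-- def shupple(n, deck):
--     # O(n): read each output position directly by a closed-form index into deck;
--     # even positions come from the front half, odd ones from the back half at mid = ceil(n/2).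
--     mid = (n + 1) // 2
--     return [deck[i // 2 + (mid if i % 2 else 0)] for i in range(n)]
-- ===== Notes on version B (the rewrite author's own statement) =====
-- stated objective: faster
-- what changed: Replaces the destructive loop that pops element 0 from two materialized half-lists (each pop(0) shifts the whole list) with a single comprehension computing each output position by a closed-form index into the original deck.
import Mathlib
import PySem

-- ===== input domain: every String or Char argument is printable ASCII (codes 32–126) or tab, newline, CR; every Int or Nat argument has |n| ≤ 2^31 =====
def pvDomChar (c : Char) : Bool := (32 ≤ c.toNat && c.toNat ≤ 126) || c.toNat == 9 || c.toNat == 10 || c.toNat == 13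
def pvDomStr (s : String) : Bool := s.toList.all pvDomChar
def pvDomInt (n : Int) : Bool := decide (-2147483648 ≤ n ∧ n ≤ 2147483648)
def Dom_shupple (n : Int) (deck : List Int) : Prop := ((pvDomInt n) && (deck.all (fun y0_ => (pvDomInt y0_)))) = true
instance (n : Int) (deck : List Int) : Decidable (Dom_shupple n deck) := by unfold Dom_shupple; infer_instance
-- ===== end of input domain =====

-- B replaces A's destructive loop popping element 0 of two materialized half-lists with a
-- single pass computing each output position by a closed-form index into the original deck.

-- ===== PORT A =====
-- one loop iteration: pop(0) from back_deck if i is odd, else from front_deck; none = IndexError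
def shuppleStep (s : Option (List Int × List Int × List Int)) (i : Int) :
    Option (List Int × List Int × List Int) :=
  s.bind fun fb =>
    if PySem.Int.mod i 2 ≠ 0 then
      match PySem.List.pop? fb.2.1 0 with
      | none => none
      | some (x, b') => some (fb.1, b', fb.2.2 ++ [x])
    else
      match PySem.List.pop? fb.1 0 with
      | none => none
      | some (x, f') => some (f', fb.2.1, fb.2.2 ++ [x])

def shupple (n : Int) (deck : List Int) : List Int :=
  let mid0 := PySem.Int.floordiv n 2
  let mid := if PySem.Int.mod n 2 ≠ 0 then mid0 + 1 else mid0
  let front := PySem.List.slice deck none (some mid)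
  let back := PySem.List.slice deck (some mid) none
  match (PySem.List.pyRange 0 n 1).foldl shuppleStep (some (front, back, [])) with
  | some s => s.2.2
  | none => []        -- unreachable under Pre_shupple (Python raises IndexError there)

-- ===== PORT B =====
-- the comprehension [deck[…] for i in range(n)]; none = IndexError at some position
def buildIdx (l : List Int) (h : Int → Option Int) : Option (List Int) :=
  match l with
  | [] => some []
  | i :: rest =>
    match h i with
    | none => none
    | some v => (buildIdx rest h).map (v :: ·)

def shupple_alt (n : Int) (deck : List Int) : List Int :=
  let mid := PySem.Int.floordiv (n + 1) 2
  (buildIdx (PySem.List.pyRange 0 n 1) (fun i =>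
      PySem.List.pyGet? deck
        (PySem.Int.floordiv i 2 + (if PySem.Int.mod i 2 ≠ 0 then mid else 0)))).getD []

-- ===== PRECONDITION & SPEC =====
-- Pre_ admits exactly the inputs where Python A returns: for n > len(deck) A's pop(0)
-- (and B's indexing) raises IndexError.
def Pre_shupple (n : Int) (deck : List Int) : Prop := n ≤ (deck.length : Int)
instance (n : Int) (deck : List Int) : Decidable (Pre_shupple n deck) := by
  unfold Pre_shupple; infer_instance

def pvWitness_shupple : Int × List Int := (3, [5, 6, 7])

def Spec_shupple (n : Int) (deck : List Int) (out : List Int) : Prop := out = shupple_alt n deck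
instance (n : Int) (deck : List Int) (out : List Int) : Decidable (Spec_shupple n deck out) := by
  unfold Spec_shupple; infer_instance

-- ===== CLAIM (what is proved, stated in full; the proofs are below) =====
def Claim_equal_shupple : Prop := ∀ (n : Int) (deck : List Int),
  Dom_shupple n deck → Pre_shupple n deck → Spec_shupple n deck (shupple n deck)

-- ===== LEMMAS AND PROOFS =====

-- interleaving model: take the head of f, then continue with the roles swapped
def itl : Nat → List Int → List Int → Option (List Int)
  | 0, _, _ => some []
  | k + 1, f, b =>
    match f with
    | [] => none
    | x :: f' => (itl k b f').map (x :: ·)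

theorem pop?_nil_zero : PySem.List.pop? ([] : List Int) 0 = none := rfl

theorem foldl_shuppleStep_none (l : List Int) : l.foldl shuppleStep none = none := by
  induction l with
  | nil => rfl
  | cons i rest ih => simpa [shuppleStep] using ih

theorem step_even_nil (b res : List Int) (i : Int) (h : PySem.Int.mod i 2 = 0) :
    shuppleStep (some ([], b, res)) i = none := by
  simp only [shuppleStep, Option.bind_some]
  rw [if_neg (not_not_intro h), pop?_nil_zero]

theorem step_even_cons (x : Int) (f' b res : List Int) (i : Int) (h : PySem.Int.mod i 2 = 0) :
    shuppleStep (some (x :: f', b, res)) i = some (f', b, res ++ [x]) := by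
  simp only [shuppleStep, Option.bind_some]
  rw [if_neg (not_not_intro h), PySem.List.pop?_zero_cons]

theorem step_odd_nil (f res : List Int) (i : Int) (h : PySem.Int.mod i 2 ≠ 0) :
    shuppleStep (some (f, [], res)) i = none := by
  simp only [shuppleStep, Option.bind_some]
  rw [if_pos h, pop?_nil_zero]

theorem step_odd_cons (x : Int) (f b' res : List Int) (i : Int) (h : PySem.Int.mod i 2 ≠ 0) :
    shuppleStep (some (f, x :: b', res)) i = some (f, b', res ++ [x]) := by
  simp only [shuppleStep, Option.bind_some]
  rw [if_pos h, PySem.List.pop?_zero_cons]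

-- A's loop starting at position a with state (f, b, res) computes itl of the remaining
-- count, with f first when a is even and b first when a is odd.
theorem loopA (k : Nat) : ∀ (a : Int) (f b res : List Int), 0 ≤ a →
    ((PySem.List.pyRange a (a + k) 1).foldl shuppleStep (some (f, b, res))).map (fun s => s.2.2)
      = (itl k (if PySem.Int.mod a 2 = 0 then f else b)
               (if PySem.Int.mod a 2 = 0 then b else f)).map (res ++ ·) := by
  induction k with
  | zero =>
    intro a f b res _
    rw [show a + (0 : Nat) = a by push_cast; ring, PySem.List.pyRange_one_eq_nil le_rfl]
    by_cases h : PySem.Int.mod a 2 = 0 <;> simp [h, itl]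
  | succ k ih =>
    intro a f b res ha
    have hlt : a < a + (k + 1 : Nat) := by push_cast; omega
    rw [PySem.List.pyRange_one_cons hlt, List.foldl_cons]
    have hmod := PySem.Int.mod_eq_emod_of_pos (a := a) (b := 2) (by omega)
    have hmod1 := PySem.Int.mod_eq_emod_of_pos (a := a + 1) (b := 2) (by omega)
    have hstep : a + (k + 1 : Nat) = (a + 1) + (k : Nat) := by push_cast; ring
    by_cases h : PySem.Int.mod a 2 = 0
    · -- even position: pop front
      cases f with
      | nil =>
        rw [step_even_nil b res a h, foldl_shuppleStep_none, if_pos h, if_pos h]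
        rfl
      | cons x f' =>
        rw [step_even_cons x f' b res a h, hstep, ih (a + 1) f' b (res ++ [x]) (by omega)]
        have h1 : ¬ PySem.Int.mod (a + 1) 2 = 0 := by rw [hmod1]; rw [hmod] at h; omega
        rw [if_neg h1, if_neg h1, if_pos h, if_pos h]
        simp only [itl]
        cases itl k b f' <;> simp
    · -- odd position: pop back
      cases b with
      | nil =>
        rw [step_odd_nil f res a h, foldl_shuppleStep_none, if_neg h, if_neg h]
        rfl
      | cons x b' =>
        rw [step_odd_cons x f b' res a h, hstep, ih (a + 1) f b' (res ++ [x]) (by omega)]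
        have h1 : PySem.Int.mod (a + 1) 2 = 0 := by rw [hmod1]; rw [hmod] at h; omega
        rw [if_pos h1, if_pos h1, if_neg h, if_neg h]
        simp only [itl]
        cases itl k f b' <;> simp

-- B's per-position reads agree with itl on the two halves
theorem buildIdx_eq_itl (k : Nat) : ∀ (a : Int) (f b : List Int) (h : Int → Option Int),
    0 ≤ a →
    (∀ j : Nat, j < k → h (a + j) = if j % 2 = 0 then f[j / 2]? else b[j / 2]?) →
    buildIdx (PySem.List.pyRange a (a + k) 1) h = itl k f b := by
  induction k with
  | zero =>
    intro a f b h _ _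
    rw [show a + (0 : Nat) = a by push_cast; ring, PySem.List.pyRange_one_eq_nil le_rfl]
    rfl
  | succ k ih =>
    intro a f b h ha hpt
    have hlt : a < a + (k + 1 : Nat) := by push_cast; omega
    rw [PySem.List.pyRange_one_cons hlt]
    have h0 : h a = f[0]? := by simpa using hpt 0 (by omega)
    cases f with
    | nil => simp [buildIdx, h0, itl]
    | cons x f' =>
      have hstep : a + (k + 1 : Nat) = (a + 1) + (k : Nat) := by push_cast; ring
      have hpt' : ∀ j : Nat, j < k →
          h (a + 1 + j) = if j % 2 = 0 then b[j / 2]? else f'[j / 2]? := by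
        intro j hj
        have hj1 := hpt (j + 1) (by omega)
        rw [show a + 1 + (j : Nat) = a + ((j + 1 : Nat) : Int) by push_cast; ring, hj1]
        rcases Nat.even_or_odd j with he | ho
        · have hj2 : (j + 1) % 2 = 1 := by have := Nat.even_iff.mp he; omega
          have hdiv : (j + 1) / 2 = j / 2 := by have := Nat.even_iff.mp he; omega
          simp [hj2, hdiv, Nat.even_iff.mp he]
        · have hj2 : (j + 1) % 2 = 0 := by have := Nat.odd_iff.mp ho; omega
          have hdiv : (j + 1) / 2 = j / 2 + 1 := by have := Nat.odd_iff.mp ho; omega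
          simp [hj2, hdiv, Nat.odd_iff.mp ho]
      rw [show buildIdx (a :: PySem.List.pyRange (a + 1) (a + (k + 1 : Nat)) 1) h
            = match h a with
              | none => none
              | some v => (buildIdx (PySem.List.pyRange (a + 1) (a + (k + 1 : Nat)) 1) h).map
                  (v :: ·) from rfl, h0]
      rw [hstep, ih (a + 1) b f' h (by omega) hpt']
      rfl

-- both ports compute itl n (deck[:mid]) (deck[mid:]) where mid = ceil(n/2)
theorem shupple_spec_aux (n : Int) (deck : List Int) :
    shupple n deck = shupple_alt n deck := by
  by_cases hn : n ≤ 0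
  · simp [shupple, shupple_alt, PySem.List.pyRange_one_eq_nil hn, buildIdx]
  obtain ⟨k, rfl⟩ : ∃ k : Nat, n = (k : Int) := ⟨n.toNat, by omega⟩
  have hk0 : 0 < k := by exact_mod_cast not_le.mp hn
  have h2 : (0:Int) < 2 := by omega
  set mid0 := PySem.Int.floordiv (k : Int) 2 with hmid0
  set midA : Int := if PySem.Int.mod (k : Int) 2 ≠ 0 then mid0 + 1 else mid0 with hmidA
  have hdiv := PySem.Int.floordiv_eq_ediv_of_pos (a := (k : Int)) h2
  have hdiv1 := PySem.Int.floordiv_eq_ediv_of_pos (a := (k : Int) + 1) h2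
  have hmodn := PySem.Int.mod_eq_emod_of_pos (a := (k : Int)) h2
  have hmidA_eq : midA = PySem.Int.floordiv ((k : Int) + 1) 2 := by
    rw [hmidA, hmid0, hdiv, hdiv1, hmodn]
    have := Int.emod_two_eq_zero_or_one (k : Int)
    split_ifs with h <;> omega
  have hmidA_nonneg : 0 ≤ midA := by rw [hmidA_eq, hdiv1]; omega
  have hmid_val : midA = ((k + 1) / 2 : Nat) := by rw [hmidA_eq, hdiv1]; omega
  have hfront : PySem.List.slice deck none (some midA) = deck.take midA.toNat :=
    PySem.List.slice_to deck hmidA_nonneg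
  have hback : PySem.List.slice deck (some midA) none = deck.drop midA.toNat :=
    PySem.List.slice_from deck hmidA_nonneg
  have hrange0 : PySem.List.pyRange 0 (k : Int) 1
      = PySem.List.pyRange 0 ((0 : Int) + (k : Nat)) 1 := by norm_num
  -- A's side
  have hA : shupple (k : Int) deck
      = (itl k (deck.take midA.toNat) (deck.drop midA.toNat)).getD [] := by
    have hloop := loopA k 0 (deck.take midA.toNat) (deck.drop midA.toNat) [] le_rfl
    rw [← hrange0] at hloop
    rw [if_pos (show PySem.Int.mod 0 2 = 0 from rfl),
        if_pos (show PySem.Int.mod 0 2 = 0 from rfl)] at hloop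
    show (match (PySem.List.pyRange 0 (k : Int) 1).foldl shuppleStep
            (some (PySem.List.slice deck none (some midA),
                   PySem.List.slice deck (some midA) none, [])) with
          | some s => s.2.2
          | none => []) = _
    rw [hfront, hback]
    cases hres : (PySem.List.pyRange 0 (k : Int) 1).foldl shuppleStep
        (some (deck.take midA.toNat, deck.drop midA.toNat, [])) with
    | none =>
      rw [hres] at hloop
      cases hitl : itl k (deck.take midA.toNat) (deck.drop midA.toNat) with
      | none => simp
      | some r => rw [hitl] at hloop; simp at hloop
    | some s =>
      rw [hres] at hloop
      cases hitl : itl k (deck.take midA.toNat) (deck.drop midA.toNat) with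
      | none => rw [hitl] at hloop; simp at hloop
      | some r =>
        rw [hitl] at hloop
        simp only [Option.map_some, Option.some.injEq, List.nil_append] at hloop
        simpa using hloop
  -- B's side
  have hB : shupple_alt (k : Int) deck
      = (itl k (deck.take midA.toNat) (deck.drop midA.toNat)).getD [] := by
    show (buildIdx (PySem.List.pyRange 0 (k : Int) 1) (fun i =>
        PySem.List.pyGet? deck
          (PySem.Int.floordiv i 2 +
            (if PySem.Int.mod i 2 ≠ 0 then PySem.Int.floordiv ((k : Int) + 1) 2 else 0)))).getD []
        = _
    rw [hrange0]
    rw [buildIdx_eq_itl k 0 (deck.take midA.toNat) (deck.drop midA.toNat) _ le_rfl ?_]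
    intro j hj
    have hfj : PySem.Int.floordiv ((j : Nat) : Int) 2 = ((j / 2 : Nat) : Int) := by
      exact_mod_cast PySem.Int.floordiv_natCast j 2
    have hmj : PySem.Int.mod ((j : Nat) : Int) 2 = ((j % 2 : Nat) : Int) := by
      exact_mod_cast PySem.Int.mod_natCast j 2
    rw [show (0 : Int) + (j : Nat) = ((j : Nat) : Int) by ring]
    simp only [hfj, hmj, ← hmidA_eq]
    rcases Nat.even_or_odd j with he | ho
    · have hj2 : j % 2 = 0 := Nat.even_iff.mp he
      have hhalf : j / 2 < midA.toNat := by rw [hmid_val]; omega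
      have hif : (if ((j % 2 : Nat) : Int) ≠ 0 then midA else 0) = 0 := by
        rw [hj2]; simp
      rw [hif, add_zero, PySem.List.pyGet?_natCast, if_pos hj2, List.getElem?_take,
        if_pos hhalf]
    · have hj2 : j % 2 = 1 := Nat.odd_iff.mp ho
      have hif : (if ((j % 2 : Nat) : Int) ≠ 0 then midA else 0) = midA := by
        rw [hj2]; simp
      rw [hif, show ((j / 2 : Nat) : Int) + midA = ((midA.toNat + j / 2 : Nat) : Int) by
        push_cast; omega, PySem.List.pyGet?_natCast, if_neg (by omega), List.getElem?_drop]
  rw [hA, hB]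

-- ===== VERDICT (by name: the statement is the Claim_ definition above) =====
theorem shupple_spec : Claim_equal_shupple := by
  intro n deck _ _
  unfold Spec_shupple
  exact shupple_spec_aux n deck
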